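-- pv_equiv track=rewrite | github.com/mmeekh/dened | utils/validators.py | validate_trc20_address
-- ===== SOURCE A (Python) =====
-- def validate_trc20_address(address: str) -> bool:
--     """Validate TRC20 wallet address format"""
--     if not isinstance(address, str):
--         return False
--
--     # Basic TRC20 address validation
--     if not address.startswith('T'):
--         return False
--
--     if len(address) != 34:
--         return False
--
--     # Check if address contains only valid characters
--     valid_chars = set('123456789ABCDEFGHJKLMNPQRSTUVWXYZabcdefghijkmnopqrstuvwxyz')
--     if not all(c in valid_chars for c in address[1:]):
--         return False
--
--     return True
-- ===== SOURCE B (Python) =====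
-- import re
--
-- _TRC20_RE = re.compile(r"T[123456789ABCDEFGHJKLMNPQRSTUVWXYZabcdefghijkmnopqrstuvwxyz]{33}")
--
-- def validate_trc20_address(address: str) -> bool:
--     """Validate TRC20 wallet address format"""
--     if not isinstance(address, str):
--         return False
--     return _TRC20_RE.fullmatch(address) is not None
-- ===== Notes on version B (the rewrite author's own statement) =====
-- stated objective: idiomatic
-- what changed: Replaces the three sequential guards (startswith, length check, per-character set membership of the tail) with a single anchored regular-expression full match consuming the leading T and then exactly 33 base58-alphabet characters, length enforced by the quantifier.
import Mathlib
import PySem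

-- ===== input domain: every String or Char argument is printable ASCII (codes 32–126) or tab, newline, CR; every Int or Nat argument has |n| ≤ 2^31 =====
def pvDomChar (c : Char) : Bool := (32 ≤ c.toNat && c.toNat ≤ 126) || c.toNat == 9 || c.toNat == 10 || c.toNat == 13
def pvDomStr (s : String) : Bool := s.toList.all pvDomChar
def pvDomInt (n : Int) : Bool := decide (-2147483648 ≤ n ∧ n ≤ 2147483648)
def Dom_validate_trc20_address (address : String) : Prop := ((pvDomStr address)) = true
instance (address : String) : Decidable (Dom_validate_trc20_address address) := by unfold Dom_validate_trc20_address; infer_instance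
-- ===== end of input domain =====

-- B replaces A's three sequential guards with a single anchored regex-style full match 'T[base58]{33}'.

-- ===== PORT A =====
-- valid_chars = set('123456789ABCDEFGHJKLMNPQRSTUVWXYZabcdefghijkmnopqrstuvwxyz')
def pvValidChars : PySem.Set Char :=
  PySem.Set.ofList "123456789ABCDEFGHJKLMNPQRSTUVWXYZabcdefghijkmnopqrstuvwxyz".toList

def validate_trc20_address (address : String) : Bool :=
  -- if not address.startswith('T'): return False
  if ¬ (PySem.Str.startswith address "T") then false
  -- if len(address) != 34: return False
  else if PySem.Str.len address ≠ 34 then false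
  -- if not all(c in valid_chars for c in address[1:]): return False
  else if ¬ ((PySem.Str.slice address (some 1) none).toList.all
              (fun c => decide (c ∈ pvValidChars))) then false
  else true

-- ===== PORT B =====
-- re.fullmatch of r"T[123456789ABCDEFGHJKLMNPQRSTUVWXYZabcdefghijkmnopqrstuvwxyz]{33}":
-- the engine consumes a literal 'T', then exactly 33 characters of the character class,
-- and the match must cover the whole string.
def pvBase58Class : List Char :=
  "123456789ABCDEFGHJKLMNPQRSTUVWXYZabcdefghijkmnopqrstuvwxyz".toList

-- consume exactly n characters of the class, succeeding iff the remainder is empty (fullmatch)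
def pvMatchClassN : Nat → List Char → Bool
  | 0, rest => rest.isEmpty
  | _ + 1, [] => false
  | n + 1, c :: rest => pvBase58Class.contains c && pvMatchClassN n rest

def validate_trc20_address_alt (address : String) : Bool :=
  match address.toList with
  | 'T' :: rest => pvMatchClassN 33 rest
  | _ => false

-- ===== PRECONDITION & SPEC =====
def Spec_validate_trc20_address (address : String) (out : Bool) : Prop := out = validate_trc20_address_alt address
instance (address : String) (out : Bool) : Decidable (Spec_validate_trc20_address address out) := by unfold Spec_validate_trc20_address; infer_instance

-- ===== CLAIM (what is proved, stated in full; the proofs are below) =====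
def Claim_equal_validate_trc20_address : Prop := ∀ (address : String), Dom_validate_trc20_address address → Spec_validate_trc20_address address (validate_trc20_address address)

-- ===== LEMMAS AND PROOFS =====

-- the matcher succeeds iff the rest has length n and each char is in the class
theorem pvMatchClassN_iff (n : Nat) (rest : List Char) :
    pvMatchClassN n rest = (rest.length == n && rest.all (fun c => pvBase58Class.contains c)) := by
  induction n generalizing rest with
  | zero => cases rest <;> simp [pvMatchClassN]
  | succ n ih =>
    cases rest with
    | nil => simp [pvMatchClassN]
    | cons c rest =>
      simp only [pvMatchClassN, ih, List.length_cons, List.all_cons]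
      by_cases hlen : rest.length = n <;> simp [hlen, Bool.and_left_comm]

theorem mem_pvValidChars_iff (c : Char) : (c ∈ pvValidChars) ↔ pvBase58Class.contains c = true := by
  rw [pvValidChars, PySem.Set.mem_ofList, List.contains_iff_mem, pvBase58Class]

theorem validate_eq_alt (address : String) :
    validate_trc20_address address = validate_trc20_address_alt address := by
  unfold validate_trc20_address validate_trc20_address_alt
  cases hl : address.toList with
  | nil =>
    have hs : PySem.Str.startswith address "T" = false := by
      rw [PySem.Str.startswith_eq, Bool.eq_false_iff]
      intro h
      rw [PySem.Chars.startswith_iff, hl] at h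
      exact absurd (List.prefix_nil.mp h) (by decide)
    rw [hs, if_pos (by simp)]
  | cons c rest =>
    by_cases hc : c = 'T'
    · subst hc
      have hs : PySem.Str.startswith address "T" = true := by
        rw [PySem.Str.startswith_eq, PySem.Chars.startswith_iff, hl]
        exact ⟨rest, rfl⟩
      have hlen : PySem.Str.len address = (rest.length : Int) + 1 := by
        simp [PySem.Str.len_eq, hl]
      have htail : (PySem.Str.slice address (some 1) none).toList = rest := by
        simp [PySem.Str.toList_slice, hl, PySem.List.slice_from_one]
      have hr : (match ('T' :: rest : List Char) with
                 | 'T' :: rest => pvMatchClassN 33 rest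
                 | _ => false) = pvMatchClassN 33 rest := rfl
      rw [hs, hlen, htail, hr, pvMatchClassN_iff]
      have key : (fun c => decide (c ∈ pvValidChars)) = (fun c : Char => pvBase58Class.contains c) := by
        funext c
        rcases Bool.eq_false_or_eq_true (pvBase58Class.contains c) with h | h <;>
          simp [h, mem_pvValidChars_iff]
      rw [key]
      rw [if_neg (by simp)]
      by_cases h34 : rest.length = 33
      · rw [if_neg (show ¬((rest.length : Int) + 1 ≠ 34) by omega)]
        cases hall : (rest.all fun c => pvBase58Class.contains c)
        · rw [if_pos (by simp [hall])]; simp [h34]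
        · rw [if_neg (by simp [hall])]; simp [h34, hall]
      · rw [if_pos (show (rest.length : Int) + 1 ≠ 34 by omega)]
        simp [h34]
    · have hs : PySem.Str.startswith address "T" = false := by
        rw [PySem.Str.startswith_eq, Bool.eq_false_iff]
        intro h
        rw [PySem.Chars.startswith_iff, hl] at h
        obtain ⟨t, ht⟩ := h
        have : c = 'T' := by
          have := congrArg (·.head?) ht
          simpa using this.symm
        exact hc this
      rw [hs, if_pos (by simp)]
      have : (match (c :: rest : List Char) with
              | 'T' :: rest => pvMatchClassN 33 rest
              | _ => false) = false := by
        split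
        · next h => simp_all
        · rfl
      exact this.symm

-- ===== VERDICT (by name: the statement is the Claim_ definition above) =====
theorem validate_trc20_address_spec : Claim_equal_validate_trc20_address := by
  intro address _
  unfold Spec_validate_trc20_address
  exact validate_eq_alt address
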